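-- pv_equiv track=rewrite | github.com/Wendystar0628/Circuit-Design-AI-Assistant | domain/simulation/executor/spice_executor.py | _detect_analysis_from_netlist
-- ===== SOURCE A (Python) =====
-- def _detect_analysis_from_netlist(netlist_content: str) -> str:
--     """
--     从网表内容检测分析类型
--
--     扫描网表中的分析命令（.ac / .dc / .tran / .noise / .op），
--     返回最后一条分析命令对应的类型。
--     """
--     analysis_type = ""
--     for line in netlist_content.splitlines():
--         stripped = line.strip().lower()
--         if stripped.startswith('*'):
--             continue
--         for cmd in ('.ac', '.dc', '.tran', '.noise', '.op'):
--             if stripped == cmd or (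
--                 stripped.startswith(cmd)
--                 and len(stripped) > len(cmd)
--                 and stripped[len(cmd)] in (' ', '\t')
--             ):
--                 analysis_type = cmd[1:]  # 去掉前缀点
--                 break
--     return analysis_type
-- ===== SOURCE B (Python) =====
-- # Tokenize each line and look the first token up in a dict, scanning lines in
-- # reverse with an early return (instead of A's forward pass with an accumulator
-- # and an inner command loop).
-- _CMD_OF = {'.ac': 'ac', '.dc': 'dc', '.tran': 'tran', '.noise': 'noise', '.op': 'op'}
--
-- def _detect_analysis_from_netlist(netlist_content: str) -> str:
--     for line in reversed(netlist_content.splitlines()):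
--         stripped = line.strip().lower()
--         tok = stripped.partition(' ')[0].partition('\t')[0]
--         if tok in _CMD_OF:
--             return _CMD_OF[tok]
--     return ""
-- ===== Notes on version B (the rewrite author's own statement) =====
-- stated objective: alternative
-- what changed: B extracts each line's first whitespace-delimited token and looks it up in a precomputed token-to-type dict, scanning the lines in reverse with an early return, instead of A's forward accumulator pass with an inner loop over the five commands testing prefix/boundary conditions per command.
import Mathlib
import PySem

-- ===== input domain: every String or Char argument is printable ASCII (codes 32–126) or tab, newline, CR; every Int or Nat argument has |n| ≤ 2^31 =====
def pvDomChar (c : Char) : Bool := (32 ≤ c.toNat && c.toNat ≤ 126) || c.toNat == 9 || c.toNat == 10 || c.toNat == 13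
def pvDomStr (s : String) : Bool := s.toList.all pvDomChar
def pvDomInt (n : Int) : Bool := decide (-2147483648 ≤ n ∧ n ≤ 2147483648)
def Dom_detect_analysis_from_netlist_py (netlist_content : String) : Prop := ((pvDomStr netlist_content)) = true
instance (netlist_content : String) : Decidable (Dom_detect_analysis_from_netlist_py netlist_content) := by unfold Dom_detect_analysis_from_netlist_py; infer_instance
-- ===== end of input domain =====

-- B scans the lines in reverse with an early return and judges each line by
-- looking its first whitespace-delimited token up in a dict, instead of A's
-- forward pass with an accumulator and an inner loop over the five commands.

-- ===== PORT A =====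
-- the tuple ('.ac', '.dc', '.tran', '.noise', '.op')
def pvCmds : List String := [".ac", ".dc", ".tran", ".noise", ".op"]

-- A's inner 'for cmd … break' loop: first matching cmd yields cmd[1:]
def pvLineCmdA (stripped : String) : Option String :=
  pvCmds.findSome? (fun cmd =>
    if stripped == cmd ||
       (PySem.Str.startswith stripped cmd &&
        decide (PySem.Str.len stripped > PySem.Str.len cmd) &&
        (PySem.Str.pyGet? stripped (PySem.Str.len cmd : Int) == some ' ' ||
         PySem.Str.pyGet? stripped (PySem.Str.len cmd : Int) == some '\t'))
    then some (PySem.Str.slice cmd (some 1) none) else none)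

def detect_analysis_from_netlist_py (netlist_content : String) : String :=
  (PySem.Str.splitlines netlist_content).foldl
    (fun analysis_type line =>
      let stripped := PySem.Str.lower (PySem.Str.strip line)
      if PySem.Str.startswith stripped "*" then analysis_type
      else
        match pvLineCmdA stripped with
        | some t => t
        | none => analysis_type) ""

-- ===== PORT B =====
-- the module-level dict {'.ac': 'ac', …}
def pvCmdOf : PySem.Dict String String :=
  PySem.Dict.ofList [(".ac", "ac"), (".dc", "dc"), (".tran", "tran"), (".noise", "noise"), (".op", "op")]

-- s.partition(c)[0] for a one-character separator c: the prefix of s before the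
-- first occurrence of c (the whole of s if c is absent) — exact for len(c) = 1.
def pvPart0 (s : List Char) (c : Char) : List Char := s.takeWhile (fun x => x ≠ c)

-- stripped.partition(' ')[0].partition('\t')[0]
def pvTok (stripped : String) : String := String.ofList (pvPart0 (pvPart0 stripped.toList ' ') '\t')

-- B's outer loop: walk the reversed line list, return the dict hit for the
-- line's first token as soon as there is one, else "".  '_CMD_OF[tok]' is
-- ported as getD with a dummy default: the guard guarantees the key is present.
def pvScanRev : List String → String
  | [] => ""
  | line :: rest =>
    let stripped := PySem.Str.lower (PySem.Str.strip line)
    let tok := pvTok stripped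
    if PySem.Dict.contains pvCmdOf tok then PySem.Dict.getD pvCmdOf tok "" else pvScanRev rest

def detect_analysis_from_netlist_py_alt (netlist_content : String) : String :=
  pvScanRev (PySem.Str.splitlines netlist_content).reverse

-- ===== PRECONDITION & SPEC =====
def Spec_detect_analysis_from_netlist_py (netlist_content : String) (out : String) : Prop := out = detect_analysis_from_netlist_py_alt netlist_content
instance (netlist_content : String) (out : String) : Decidable (Spec_detect_analysis_from_netlist_py netlist_content out) := by unfold Spec_detect_analysis_from_netlist_py; infer_instance

-- ===== CLAIM (what is proved, stated in full; the proofs are below) =====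
def Claim_equal_detect_analysis_from_netlist_py : Prop := ∀ (netlist_content : String), Dom_detect_analysis_from_netlist_py netlist_content → Spec_detect_analysis_from_netlist_py netlist_content (detect_analysis_from_netlist_py netlist_content)

-- ===== LEMMAS AND PROOFS =====

-- token predicate: the characters a token may contain (neither separator)
def pvTokP : Char → Bool := fun c => c ≠ ' ' && c ≠ '\t'

theorem pvTakeWhile_all_append (l r : List Char) (h : ∀ c ∈ l, pvTokP c = true) :
    (l ++ r).takeWhile pvTokP = l ++ r.takeWhile pvTokP := by
  rw [List.takeWhile_append, List.takeWhile_eq_self_iff.mpr h]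
  simp

-- the per-command predicate of A holds exactly when the line's first token IS the command
theorem pvMatch_iff (c : List Char) (hc : ∀ x ∈ c, pvTokP x = true) (hne : c ≠ []) (l : List Char) :
    (l = c ∨ (c <+: l ∧ l.length > c.length ∧
      (PySem.Chars.pyGet? l (c.length : Int) = some ' ' ∨ PySem.Chars.pyGet? l (c.length : Int) = some '\t')))
    ↔ l.takeWhile pvTokP = c := by
  constructor
  · rintro (rfl | ⟨⟨r, rfl⟩, hlen, hget⟩)
    · exact List.takeWhile_eq_self_iff.mpr hc
    · rw [pvTakeWhile_all_append _ _ hc]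
      have hget' : PySem.Chars.pyGet? (c ++ r) (c.length : Int) = r.head? := by
        simp [PySem.Chars.pyGet?, PySem.List.pyGet?_natCast, List.getElem?_append_right,
          List.head?_eq_getElem?]
      cases r with
      | nil => simp at hlen
      | cons x r' =>
        rw [hget'] at hget
        have hx : x = ' ' ∨ x = '\t' := by
          rcases hget with h | h <;> simp at h <;> [left; right] <;> exact h
        have : pvTokP x = false := by rcases hx with rfl | rfl <;> simp [pvTokP]
        simp [List.takeWhile_cons, this]
  · intro h
    have hp : c <+: l := h ▸ List.takeWhile_prefix pvTokP
    obtain ⟨r, rfl⟩ := hp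
    cases r with
    | nil => left; simp
    | cons x r' =>
      right
      rw [pvTakeWhile_all_append _ _ hc] at h
      have hx : pvTokP x = false := by
        by_contra hb
        have : pvTokP x = true := by simpa using hb
        simp [this] at h
      have hx' : x = ' ' ∨ x = '\t' := by
        by_contra hb
        push_neg at hb
        simp [pvTokP, hb.1, hb.2] at hx
      have hget : PySem.Chars.pyGet? (c ++ x :: r') (c.length : Int) = some x := by
        simp [PySem.Chars.pyGet?, PySem.List.pyGet?_natCast, List.getElem?_append_right]
      exact ⟨⟨_, rfl⟩, by simp, by rw [hget]; rcases hx' with rfl | rfl <;> simp⟩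

theorem pvTok_toList (s : String) : (pvTok s).toList = s.toList.takeWhile pvTokP := by
  simp only [pvTok, pvPart0, String.toList_ofList, List.takeWhile_takeWhile]
  congr 1
  funext c
  by_cases h1 : c = ' ' <;> by_cases h2 : c = '\t' <;> simp [pvTokP, h1, h2]

theorem pvCond_eq (cmd s : String) (hc : ∀ x ∈ cmd.toList, pvTokP x = true) (hne : cmd.toList ≠ []) :
    (s == cmd ||
     (PySem.Str.startswith s cmd &&
      decide (PySem.Str.len s > PySem.Str.len cmd) &&
      (PySem.Str.pyGet? s (PySem.Str.len cmd : Int) == some ' ' ||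
       PySem.Str.pyGet? s (PySem.Str.len cmd : Int) == some '\t')))
    = (s.toList.takeWhile pvTokP == cmd.toList) := by
  rw [Bool.eq_iff_iff]
  simp only [Bool.or_eq_true, Bool.and_eq_true, beq_iff_eq, decide_eq_true_eq,
    PySem.Str.len_eq, PySem.Str.pyGet?_eq, PySem.Chars.startswith_iff, gt_iff_lt, Nat.cast_lt,
    PySem.Str.startswith_eq, and_assoc]
  rw [show (s = cmd) ↔ (s.toList = cmd.toList) from String.toList_inj.symm]
  exact (pvMatch_iff cmd.toList hc hne s.toList).symm.symm

theorem pvStar_head (s : String) (h : PySem.Str.startswith s "*" = true) :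
    (s.toList.takeWhile pvTokP).head? = some '*' := by
  rw [PySem.Str.startswith_eq] at h
  obtain ⟨r, hr⟩ := (PySem.Chars.startswith_iff _ _).mp h
  have : s.toList = '*' :: r := by simpa using hr.symm
  rw [this]
  simp [List.takeWhile_cons, pvTokP]

-- the per-line judgements of A and B agree on every line
set_option maxRecDepth 8000 in
theorem pvLine_eq (s : String) :
    (if PySem.Str.startswith s "*" then none else pvLineCmdA s) = PySem.Dict.get? pvCmdOf (pvTok s) := by
  have ht := pvTok_toList s
  have hitems : pvCmdOf.items = [(".ac","ac"), (".dc","dc"), (".tran","tran"), (".noise","noise"), (".op","op")] := rfl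
  have ec : ∀ c : String, (c == pvTok s) = decide (s.toList.takeWhile pvTokP = c.toList) := by
    intro c
    rw [Bool.eq_iff_iff]
    simp only [beq_iff_eq, decide_eq_true_eq]
    constructor
    · intro h; rw [← ht, ← h]
    · intro h; exact String.toList_inj.mp (by rw [ht, h])
  have hstar : ∀ cl : List Char,
      s.toList.takeWhile pvTokP = '.' :: cl → PySem.Str.startswith s "*" = false := by
    intro cl hcl
    by_contra hb
    rw [Bool.not_eq_false] at hb
    have := pvStar_head s hb
    rw [hcl] at this
    simp at this
  simp only [pvLineCmdA, pvCmds, List.findSome?]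
  rw [pvCond_eq ".ac" s (by rw [show ".ac".toList = ['.', 'a', 'c'] from by simp]; simp [pvTokP]) (by simp),
      pvCond_eq ".dc" s (by rw [show ".dc".toList = ['.', 'd', 'c'] from by simp]; simp [pvTokP]) (by simp),
      pvCond_eq ".tran" s (by rw [show ".tran".toList = ['.', 't', 'r', 'a', 'n'] from by simp]; simp [pvTokP]) (by simp),
      pvCond_eq ".noise" s (by rw [show ".noise".toList = ['.', 'n', 'o', 'i', 's', 'e'] from by simp]; simp [pvTokP]) (by simp),
      pvCond_eq ".op" s (by rw [show ".op".toList = ['.', 'o', 'p'] from by simp]; simp [pvTokP]) (by simp)]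
  simp only [PySem.Dict.get?, hitems, List.find?, ec]
  by_cases h1 : s.toList.takeWhile pvTokP = ['.', 'a', 'c']
  · rw [hstar _ (by simpa using h1)]
    simp [h1]
    rfl
  · by_cases h2 : s.toList.takeWhile pvTokP = ['.', 'd', 'c']
    · rw [hstar _ (by simpa using h2)]
      simp [h1, h2]
      rfl
    · by_cases h3 : s.toList.takeWhile pvTokP = ['.', 't', 'r', 'a', 'n']
      · rw [hstar _ (by simpa using h3)]
        simp [h1, h2, h3]
        rfl
      · by_cases h4 : s.toList.takeWhile pvTokP = ['.', 'n', 'o', 'i', 's', 'e']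
        · rw [hstar _ (by simpa using h4)]
          simp [h1, h2, h3, h4]
          rfl
        · by_cases h5 : s.toList.takeWhile pvTokP = ['.', 'o', 'p']
          · rw [hstar _ (by simpa using h5)]
            simp [h1, h2, h3, h4, h5]
            rfl
          · simp [h1, h2, h3, h4, h5]

-- A's foldl over a generic per-line judgement is the last hit = first hit of the reverse
theorem pvFoldl_eq_findSome?_reverse (f : String → Option String) (ls : List String) (a : String) :
    ls.foldl (fun acc line => match f line with | some t => t | none => acc) a
      = ((ls.reverse.findSome? f).getD a) := by
  induction ls using List.reverseRecOn generalizing a with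
  | nil => rfl
  | append_singleton rest l ih =>
    simp only [List.foldl_append, List.foldl_cons, List.foldl_nil,
      List.reverse_append, List.reverse_cons, List.reverse_nil, List.nil_append,
      List.cons_append, List.findSome?_cons, ih]
    cases h : f l <;> simp

theorem pvDict_contains_eq_isSome {κ ν : Type} [BEq κ] (d : PySem.Dict κ ν) (k : κ) :
    PySem.Dict.contains d k = (PySem.Dict.get? d k).isSome := by
  simp [PySem.Dict.contains, PySem.Dict.get?, List.isSome_find?]

theorem pvScanRev_eq_findSome? (ls : List String) :
    pvScanRev ls = ((ls.findSome? (fun line => PySem.Dict.get? pvCmdOf (pvTok (PySem.Str.lower (PySem.Str.strip line))))).getD "") := by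
  induction ls with
  | nil => rfl
  | cons l rest ih =>
    simp only [pvScanRev, List.findSome?_cons, pvDict_contains_eq_isSome, PySem.Dict.getD]
    generalize PySem.Dict.get? pvCmdOf (pvTok (PySem.Str.lower (PySem.Str.strip l))) = o
    cases o with
    | none => simpa using ih
    | some t => rfl

-- ===== VERDICT (by name: the statement is the Claim_ definition above) =====
theorem detect_analysis_from_netlist_py_spec : Claim_equal_detect_analysis_from_netlist_py := by
  intro netlist_content _
  unfold Spec_detect_analysis_from_netlist_py
  unfold detect_analysis_from_netlist_py detect_analysis_from_netlist_py_alt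
  have hb : (fun (analysis_type line : String) =>
      let stripped := PySem.Str.lower (PySem.Str.strip line)
      if PySem.Str.startswith stripped "*" then analysis_type
      else
        match pvLineCmdA stripped with
        | some t => t
        | none => analysis_type)
    = (fun acc line =>
        match (fun l => if PySem.Str.startswith (PySem.Str.lower (PySem.Str.strip l)) "*" then none
                        else pvLineCmdA (PySem.Str.lower (PySem.Str.strip l))) line with
        | some t => t
        | none => acc) := by
    funext acc line
    show (if PySem.Str.startswith (PySem.Str.lower (PySem.Str.strip line)) "*" then acc
          else
            match pvLineCmdA (PySem.Str.lower (PySem.Str.strip line)) with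
            | some t => t
            | none => acc) = _
    by_cases h : PySem.Chars.startswith (PySem.Chars.lower (PySem.Chars.strip line.toList)) ['*'] = true <;>
      simp [h]
  rw [hb, pvFoldl_eq_findSome?_reverse]
  have hf : (fun l => if PySem.Str.startswith (PySem.Str.lower (PySem.Str.strip l)) "*" then none
                      else pvLineCmdA (PySem.Str.lower (PySem.Str.strip l)))
      = (fun line => PySem.Dict.get? pvCmdOf (pvTok (PySem.Str.lower (PySem.Str.strip line)))) :=
    funext fun l => pvLine_eq (PySem.Str.lower (PySem.Str.strip l))
  rw [hf, pvScanRev_eq_findSome?]
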